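-- pv_equiv track=rewrite | github.com/IfGF-UUlm/saa-forta | comorbidities/comorbidities.py | multimorbidity_to_dict
-- ===== SOURCE A (Python) =====
-- def multimorbidity_to_dict(comorbidities, max_number=20):
--     """
--     Converts a list of comorbidities into a fixed-length dictionary.
--
--     The output dictionary contains keys labeled 'multimorbidity_1' through
--     'multimorbidity_{max_number}', filled sequentially with the provided comorbidities.
--     Remaining slots are filled with None if the list is shorter than `max_number`.
--
--     Args:
--         comorbidities (list or tuple): List or tuple of comorbidity strings.
--         max_number (int, optional): Total number of keys to include in the output. Defaults to 20.
--
--     Returns: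
--         dict: Dictionary with fixed-length comorbidity entries.
--     """
--     comorbidity_dict = {}
--
--     for i in range(max_number):
--         # Fill with actual comorbidity if available, otherwise use None
--         if i < len(comorbidities):
--             comorbidity_dict[f'multimorbidity_{i+1}'] = comorbidities[i]
--         else:
--             comorbidity_dict[f'multimorbidity_{i+1}'] = None
--
--     return comorbidity_dict
-- ===== SOURCE B (Python) =====
-- def multimorbidity_to_dict(comorbidities, max_number=20):
--     n = max(max_number, 0)
--     padded = (list(comorbidities) + [None] * n)[:n]
--     return {f'multimorbidity_{i + 1}': v for i, v in enumerate(padded)}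
-- ===== Notes on version B (the rewrite author's own statement) =====
-- stated objective: idiomatic
-- what changed: B builds the value sequence once by padding the input with None and truncating to length, then builds the dict in a single unconditional enumerate comprehension, dropping A's per-index range loop with its bounds-check branch.
import Mathlib
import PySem

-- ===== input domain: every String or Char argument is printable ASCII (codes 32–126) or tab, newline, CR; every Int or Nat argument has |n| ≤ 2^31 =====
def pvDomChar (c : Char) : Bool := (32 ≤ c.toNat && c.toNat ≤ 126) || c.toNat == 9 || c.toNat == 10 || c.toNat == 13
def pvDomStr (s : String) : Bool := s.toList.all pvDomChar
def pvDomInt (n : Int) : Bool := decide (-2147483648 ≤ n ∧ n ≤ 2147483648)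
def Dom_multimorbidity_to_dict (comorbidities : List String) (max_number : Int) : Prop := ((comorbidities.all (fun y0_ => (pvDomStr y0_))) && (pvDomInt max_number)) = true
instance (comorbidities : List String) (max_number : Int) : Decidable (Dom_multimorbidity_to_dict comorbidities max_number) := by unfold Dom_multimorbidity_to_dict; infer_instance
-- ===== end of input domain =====

-- B replaces A's bounds-checked range loop by one unconditional pass over a None-padded,
-- truncated copy of the input (objective: more idiomatic decomposition; not faster).

-- ===== PORT A =====
def multimorbidity_to_dict (comorbidities : List String) (max_number : Int) : List (String × Option String) :=
  ((PySem.List.pyRange 0 max_number 1).foldl (fun d i =>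
      if i < (comorbidities.length : Int) then
        d.insert ("multimorbidity_" ++ PySem.Int.toStr (i + 1)) (PySem.List.pyGet? comorbidities i)
      else
        d.insert ("multimorbidity_" ++ PySem.Int.toStr (i + 1)) none)
    PySem.Dict.empty).items

-- ===== PORT B =====
-- padded = (list(comorbidities) + [None] * n)[:n]; [None] * n is long enough to pad, [:n] truncates
def multimorbidity_to_dict_alt (comorbidities : List String) (max_number : Int) : List (String × Option String) :=
  let n := (max max_number 0).toNat
  let padded := (comorbidities.map some ++ List.replicate n none).take n
  (PySem.List.enumerate padded).map (fun p => ("multimorbidity_" ++ PySem.Int.toStr (p.1 + 1), p.2))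

-- ===== PRECONDITION & SPEC =====
def Spec_multimorbidity_to_dict (comorbidities : List String) (max_number : Int) (out : List (String × Option String)) : Prop := out = multimorbidity_to_dict_alt comorbidities max_number
instance (comorbidities : List String) (max_number : Int) (out : List (String × Option String)) : Decidable (Spec_multimorbidity_to_dict comorbidities max_number out) := by unfold Spec_multimorbidity_to_dict; infer_instance

-- ===== CLAIM (what is proved, stated in full; the proofs are below) =====
def Claim_equal_multimorbidity_to_dict : Prop := ∀ (comorbidities : List String) (max_number : Int), Dom_multimorbidity_to_dict comorbidities max_number → Spec_multimorbidity_to_dict comorbidities max_number (multimorbidity_to_dict comorbidities max_number)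

-- ===== LEMMAS AND PROOFS =====

theorem pv_digitChar_inj (a b : Nat) (ha : a < 10) (hb : b < 10)
    (h : Nat.digitChar a = Nat.digitChar b) : a = b := by
  interval_cases a <;> interval_cases b <;> simp_all [Nat.digitChar]

theorem pv_toDigits10_inj (a : Nat) : ∀ b, Nat.toDigits 10 a = Nat.toDigits 10 b → a = b := by
  induction a using Nat.strong_induction_on with
  | _ a ih =>
    intro b h
    rw [Nat.toDigits_eq_if (b := 10) (n := a) (by norm_num),
      Nat.toDigits_eq_if (b := 10) (n := b) (by norm_num)] at h
    by_cases haa : a < 10 <;> by_cases hbb : b < 10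
    · rw [if_pos haa, if_pos hbb] at h
      exact pv_digitChar_inj a b haa hbb (List.singleton_injective h)
    · rw [if_pos haa, if_neg hbb] at h
      have hp : 0 < (Nat.toDigits 10 (b / 10)).length := Nat.length_toDigits_pos
      have hlen := congrArg List.length h
      simp only [List.length_singleton, List.length_append] at hlen
      omega
    · rw [if_neg haa, if_pos hbb] at h
      have hp : 0 < (Nat.toDigits 10 (a / 10)).length := Nat.length_toDigits_pos
      have hlen := congrArg List.length h
      simp only [List.length_singleton, List.length_append] at hlen
      omega
    · rw [if_neg haa, if_neg hbb] at h
      have h1 := List.append_inj_right' h (by simp)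
      have h2 : Nat.toDigits 10 (a / 10) = Nat.toDigits 10 (b / 10) :=
        List.append_inj_left' h (by simp)
      have hd : a % 10 = b % 10 := by
        have := List.singleton_injective h1
        exact pv_digitChar_inj _ _ (Nat.mod_lt _ (by norm_num)) (Nat.mod_lt _ (by norm_num)) this
      have hq : a / 10 = b / 10 := ih _ (Nat.div_lt_self (by omega) (by norm_num)) _ h2
      omega

theorem pv_toStr_inj_nonneg (a b : Int) (ha : 0 ≤ a) (hb : 0 ≤ b)
    (h : PySem.Int.toStr a = PySem.Int.toStr b) : a = b := by
  unfold PySem.Int.toStr PySem.Int.toChars at h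
  rw [if_neg (by omega), if_neg (by omega)] at h
  have := pv_toDigits10_inj a.toNat b.toNat (by simpa using congrArg String.toList h)
  omega

theorem pv_key_inj (i j : Int) (hi : 0 ≤ i) (hj : 0 ≤ j)
    (h : "multimorbidity_" ++ PySem.Int.toStr (i + 1) = "multimorbidity_" ++ PySem.Int.toStr (j + 1)) :
    i = j := by
  have h' : PySem.Int.toStr (i + 1) = PySem.Int.toStr (j + 1) := by
    have := congrArg String.toList h
    simp only [String.toList_append] at this
    exact String.toList_injective (List.append_cancel_left this)
  have := pv_toStr_inj_nonneg (i + 1) (j + 1) (by omega) (by omega) h'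
  omega

theorem pv_items_eq (comorbidities : List String) (max_number : Int) :
    multimorbidity_to_dict comorbidities max_number =
      (PySem.List.pyRange 0 max_number 1).map (fun i =>
        ("multimorbidity_" ++ PySem.Int.toStr (i + 1),
         if i < (comorbidities.length : Int) then PySem.List.pyGet? comorbidities i else none)) := by
  unfold multimorbidity_to_dict
  have hfun : (fun (d : PySem.Dict String (Option String)) (i : Int) =>
      if i < (comorbidities.length : Int) then
        d.insert ("multimorbidity_" ++ PySem.Int.toStr (i + 1)) (PySem.List.pyGet? comorbidities i)
      else
        d.insert ("multimorbidity_" ++ PySem.Int.toStr (i + 1)) none) =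
      (fun d i => d.insert ("multimorbidity_" ++ PySem.Int.toStr (i + 1))
        (if i < (comorbidities.length : Int) then PySem.List.pyGet? comorbidities i else none)) := by
    funext d i
    by_cases h : i < (comorbidities.length : Int) <;> simp [h]
  rw [hfun]
  have hnodup : ((PySem.List.pyRange 0 max_number 1).map
      (fun i => "multimorbidity_" ++ PySem.Int.toStr (i + 1))).Nodup := by
    refine List.Nodup.map_on ?_ (PySem.List.nodup_pyRange_one 0 max_number)
    intro i hi j hj h
    exact pv_key_inj i j (PySem.List.mem_pyRange_one.mp hi).1 (PySem.List.mem_pyRange_one.mp hj).1 h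
  rw [PySem.Dict.items_foldl_insert_fresh (PySem.List.pyRange 0 max_number 1)
      (fun i => "multimorbidity_" ++ PySem.Int.toStr (i + 1))
      (fun i => if i < (comorbidities.length : Int) then PySem.List.pyGet? comorbidities i else none)
      PySem.Dict.empty (by intro a _; simp [PySem.Dict.contains_empty]) hnodup]
  simp [PySem.Dict.empty]

-- ===== VERDICT (by name: the statement is the Claim_ definition above) =====
theorem multimorbidity_to_dict_spec : Claim_equal_multimorbidity_to_dict := by
  intro comorbidities max_number _
  unfold Spec_multimorbidity_to_dict
  rw [pv_items_eq]
  unfold multimorbidity_to_dict_alt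
  set L := comorbidities.length with hL
  set n := (max max_number 0).toNat with hn
  have hpad : ((comorbidities.map some ++ List.replicate n none).take n).length = n := by
    simp
  apply List.ext_getElem
  · simp [PySem.List.pyRange_one, PySem.List.length_enumerate, hpad]
    omega
  · intro j h1 h2
    have hj : j < n := by
      simpa [PySem.List.length_enumerate, hpad] using h2
    have hjmax : (j : Int) < max_number := by
      simp [hn] at hj; omega
    simp only [List.getElem_map, PySem.List.getElem_enumerate, PySem.List.getElem_pyRange_one]
    have hpadget : ((comorbidities.map some ++ List.replicate n none).take n)[j]'(by omega) =
        if h : j < L then some (comorbidities[j]'h) else none := by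
      rw [List.getElem_take]
      by_cases hjl : j < L
      · rw [List.getElem_append_left (by simpa [hL] using hjl)]
        simp [hjl]
      · rw [List.getElem_append_right (by simpa [hL] using hjl)]
        simp [hjl]
    rw [hpadget]
    by_cases hjl : j < L
    · have : ((j : Int)) < (L : Int) := by omega
      simp [this, hjl, PySem.List.pyGet?_natCast, List.getElem?_eq_getElem (by simpa [hL] using hjl)]
    · have : ¬ ((j : Int) + 0) < (L : Int) := by omega
      simp [hjl]
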